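-- pv_equiv track=rewrite | github.com/Jeffrey-Sardina/cod-trachtais | my_code/scrape_evallogs.py | extract_csv_data
-- ===== SOURCE A (Python) =====
-- def extract_csv_data(csv_data):
--     keys = []
--     vals = []
--     colon_sep_pairs = [x for x in csv_data.strip().split(',')]
--     for pair in colon_sep_pairs:
--         key, val = [x.strip() for x in pair.split(':')]
--         keys.append(key)
--         vals.append(val)
--     return keys, vals
-- ===== SOURCE B (Python) =====
-- def extract_csv_data(csv_data):
--     # Recursive-descent parser: peel one comma-separated record per call with
--     # str.partition, recursing on the rest; each record must be exactly
--     # 'key:value' (the two-element unpacking raises ValueError otherwise).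
--     def go(s):
--         head, sep, rest = s.partition(',')
--         k, v = [x.strip() for x in head.split(':')]
--         if not sep:
--             return [k], [v]
--         ks, vs = go(rest)
--         return [k] + ks, [v] + vs
--     return go(csv_data.strip())
-- ===== Notes on version B (the rewrite author's own statement) =====
-- stated objective: alternative
-- what changed: Replaces the split(',') loop with two parallel accumulators by a recursive-descent parser that peels one record per call with str.partition and builds both result lists through the recursion by concatenation.
import Mathlib
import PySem

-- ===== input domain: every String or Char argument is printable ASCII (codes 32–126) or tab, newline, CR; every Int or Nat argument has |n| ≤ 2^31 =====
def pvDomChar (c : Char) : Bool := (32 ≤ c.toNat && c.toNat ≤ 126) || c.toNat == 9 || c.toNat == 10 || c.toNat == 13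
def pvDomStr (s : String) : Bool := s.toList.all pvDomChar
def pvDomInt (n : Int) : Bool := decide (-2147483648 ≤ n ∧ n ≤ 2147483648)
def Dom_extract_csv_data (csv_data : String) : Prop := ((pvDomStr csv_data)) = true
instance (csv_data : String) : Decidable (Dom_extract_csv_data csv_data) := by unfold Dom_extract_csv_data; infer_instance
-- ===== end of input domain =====

-- B replaces the split(',')/split(':') loop with two parallel accumulators by a
-- recursive-descent parser: one str.partition per record, recursion on the rest.

-- ===== PORT A =====
-- s.split(sep) = PySem.Str.split?; sep here is the literal "," / ":" (never empty), so '.getD []' is never taken.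
-- Loop body: 'key, val = [x.strip() for x in pair.split(':')]' raises ValueError unless the
-- split has exactly two pieces; Pre_ excludes those inputs, the `_` branch is unreachable there.
def extract_csv_data (csv_data : String) : List String × List String :=
  let colon_sep_pairs := ((PySem.Str.split? (PySem.Str.strip csv_data) ",").getD []).map id
  colon_sep_pairs.foldl
    (fun (acc : List String × List String) pair =>
      match ((PySem.Str.split? pair ":").getD []).map PySem.Str.strip with
      | [key, val] => (acc.1 ++ [key], acc.2 ++ [val])
      | _ => acc)   -- Python raises ValueError here; outside Pre_
    ([], [])

-- ===== PORT B =====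
-- s.partition(c) for a one-char separator, ported by hand (PySem has no partition):
-- scan for the first occurrence of c, return (before, [c] or [], after) — exact.
def pvPartitionC (s : List Char) (c : Char) : List Char × List Char × List Char :=
  match s with
  | [] => ([], [], [])
  | x :: xs =>
    if x = c then ([], [c], xs)
    else
      let (a, b, r) := pvPartitionC xs c
      (x :: a, b, r)

theorem pvPartitionC_rest_lt (s : List Char) (c : Char)
    (h : (pvPartitionC s c).2.1 ≠ []) : (pvPartitionC s c).2.2.length < s.length := by
  induction s with
  | nil => simp [pvPartitionC] at h
  | cons x xs ih =>
    by_cases hx : x = c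
    · simp [pvPartitionC, hx]
    · simp only [pvPartitionC, if_neg hx] at h ⊢
      exact Nat.lt_succ_of_lt (ih h)

-- the inner recursive helper 'go' of B, on char lists; the 'k, v = …' unpacking
-- is ported as a length-2 check plus indexing: it raises ValueError unless head
-- splits on ':' into exactly two pieces (the else branch; Pre_ excludes those inputs)
def pvGoB (s : List Char) : List (List Char) × List (List Char) :=
  let p := pvPartitionC s ','
  let kv := ((PySem.Chars.split? p.1 [':']).getD []).map PySem.Chars.strip
  if hkv : kv.length = 2 then
    let k := kv[0]
    let v := kv[1]
    if hsep : p.2.1 = [] then ([k], [v])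
    else
      let t := pvGoB p.2.2
      (k :: t.1, v :: t.2)
  else ([], [])   -- Python raises ValueError here; outside Pre_
termination_by s.length
decreasing_by exact pvPartitionC_rest_lt s ',' hsep

def extract_csv_data_alt (csv_data : String) : List String × List String :=
  let t := pvGoB (PySem.Chars.strip csv_data.toList)
  (t.1.map String.ofList, t.2.map String.ofList)

-- ===== PRECONDITION & SPEC =====
-- Pre_ holds exactly where Python A returns: every comma-separated piece splits on ':' into
-- exactly two parts (otherwise the two-element unpacking raises ValueError in A).
def Pre_extract_csv_data (csv_data : String) : Prop :=
  ∀ pair ∈ (PySem.Str.split? (PySem.Str.strip csv_data) ",").getD [],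
    ((PySem.Str.split? pair ":").getD []).length = 2
instance (csv_data : String) : Decidable (Pre_extract_csv_data csv_data) := by
  unfold Pre_extract_csv_data; infer_instance
def pvWitness_extract_csv_data : String := "a: 1, b: 2"
def Spec_extract_csv_data (csv_data : String) (out : List String × List String) : Prop := out = extract_csv_data_alt csv_data
instance (csv_data : String) (out : List String × List String) : Decidable (Spec_extract_csv_data csv_data out) := by unfold Spec_extract_csv_data; infer_instance

-- ===== CLAIM (what is proved, stated in full; the proofs are below) =====
def Claim_equal_extract_csv_data : Prop := ∀ (csv_data : String), Dom_extract_csv_data csv_data → Pre_extract_csv_data csv_data → Spec_extract_csv_data csv_data (extract_csv_data csv_data)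

-- ===== LEMMAS AND PROOFS =====

-- split on a single-char separator, written as the structural recursion the proofs use
def pvSplitC (c : Char) (pre : List Char) : List Char → List (List Char)
  | [] => [pre]
  | x :: xs => if x = c then pre :: pvSplitC c [] xs else pvSplitC c (pre ++ [x]) xs

theorem pvSplitC_ne_nil (c : Char) (pre s : List Char) : pvSplitC c pre s ≠ [] := by
  induction s generalizing pre with
  | nil => simp [pvSplitC]
  | cons x xs ih =>
    by_cases hx : x = c
    · simp [pvSplitC, hx]
    · simp only [pvSplitC, if_neg hx]
      exact ih _

-- PySem's fuelled splitOn.go, on a single-char separator, is pvSplitC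
theorem pvGo_eq_pvSplitC (c : Char) (fuel : Nat) (l cur : List Char)
    (acc : List (List Char)) (h : l.length ≤ fuel) :
    PySem.Chars.splitOn.go [c] fuel l cur acc = acc.reverse ++ pvSplitC c cur.reverse l := by
  induction l generalizing fuel cur acc with
  | nil =>
    cases fuel with
    | zero => simp [PySem.Chars.splitOn.go, pvSplitC]
    | succ f => simp [PySem.Chars.splitOn.go, pvSplitC]
  | cons x xs ih =>
    cases fuel with
    | zero => simp at h
    | succ f =>
      simp only [List.length_cons, Nat.succ_le_succ_iff] at h
      by_cases hx : x = c
      · have hp : List.isPrefixOf [c] (x :: xs) = true := by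
          simp [List.isPrefixOf, hx]
        simp [PySem.Chars.splitOn.go, ih f [] (cur.reverse :: acc) (by simpa using h),
          pvSplitC, hx]
      · have hp : List.isPrefixOf [c] (x :: xs) = false := by
          simp [List.isPrefixOf]
          exact fun hc => absurd hc.symm hx
        simp only [PySem.Chars.splitOn.go, hp]
        rw [ih f (x :: cur) acc h]
        simp [pvSplitC, hx]

theorem pvSplitOn_single (c : Char) (s : List Char) :
    PySem.Chars.splitOn s [c] = pvSplitC c [] s := by
  unfold PySem.Chars.splitOn
  rw [pvGo_eq_pvSplitC c (s.length + 1) s [] [] (Nat.le_succ _)]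
  simp

-- pvSplitC characterised through pvPartitionC: peel the piece before the first c
theorem pvSplitC_partition (c : Char) (s pre : List Char) :
    pvSplitC c pre s =
      if (pvPartitionC s c).2.1 = [] then [pre ++ s]
      else (pre ++ (pvPartitionC s c).1) :: pvSplitC c [] (pvPartitionC s c).2.2 := by
  induction s generalizing pre with
  | nil => simp [pvSplitC, pvPartitionC]
  | cons x xs ih =>
    by_cases hx : x = c
    · simp [pvSplitC, pvPartitionC, hx]
    · simp only [pvSplitC, if_neg hx, pvPartitionC]
      rw [ih (pre ++ [x])]
      by_cases hs : (pvPartitionC xs c).2.1 = [] <;> simp [hs]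

-- when a piece contains exactly one ':', A's two split parts are B's partition parts
theorem pvPiece_two (p : List Char) (h : (pvSplitC ':' [] p).length = 2) :
    pvSplitC ':' [] p = [(pvPartitionC p ':').1, (pvPartitionC p ':').2.2] := by
  rw [pvSplitC_partition] at h ⊢
  by_cases hs : (pvPartitionC p ':').2.1 = []
  · simp [hs] at h
  · simp only [if_neg hs] at h ⊢
    simp only [List.length_cons, List.nil_append] at h ⊢
    have h1 : (pvSplitC ':' [] (pvPartitionC p ':').2.2).length = 1 := by omega
    rw [pvSplitC_partition] at h1 ⊢
    by_cases hr : (pvPartitionC (pvPartitionC p ':').2.2 ':').2.1 = []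
    · simp [hr]
    · simp only [if_neg hr, List.length_cons] at h1
      have := pvSplitC_ne_nil ':' [] (pvPartitionC (pvPartitionC p ':').2.2 ':').2.2
      cases hh : pvSplitC ':' [] (pvPartitionC (pvPartitionC p ':').2.2 ':').2.2 with
      | nil => exact absurd hh this
      | cons a t => simp [hh] at h1

-- when the separator is absent, partition's first component is the whole string
theorem pvPartitionC_head_of_no_sep (s : List Char) (c : Char)
    (h : (pvPartitionC s c).2.1 = []) : (pvPartitionC s c).1 = s := by
  induction s with
  | nil => simp [pvPartitionC]
  | cons x xs ih =>
    by_cases hx : x = c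
    · simp [pvPartitionC, hx] at h
    · simp only [pvPartitionC, if_neg hx] at h ⊢
      simp [ih h]

-- the per-piece value both programs compute (key, value), on char lists
def pvPairC (p : List Char) : List Char × List Char :=
  (PySem.Chars.strip (pvPartitionC p ':').1, PySem.Chars.strip (pvPartitionC p ':').2.2)

-- on char lists: each comma piece splits on ':' into exactly two parts
def pvOkC (s : List Char) : Prop :=
  ∀ p ∈ pvSplitC ',' [] s, (pvSplitC ':' [] p).length = 2

-- under pvOkC, B's recursion computes the unzip of pvPairC over the comma pieces
theorem pvGoB_eq_unzip (s : List Char) (hok : pvOkC s) :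
    pvGoB s = ((pvSplitC ',' [] s).map pvPairC).unzip := by
  induction s using pvGoB.induct with
  | case1 s p kv hkv hsep =>
    have hsep' : (pvPartitionC s ',').2.1 = [] := hsep
    have hhead := pvPartitionC_head_of_no_sep s ',' hsep'
    have h2 : (pvSplitC ':' [] s).length = 2 := by
      have hmem : s ∈ pvSplitC ',' [] s := by rw [pvSplitC_partition]; simp [hsep']
      exact hok s hmem
    rw [pvGoB, pvSplitC_partition]
    simp [hsep', pvPairC, PySem.Chars.split?, pvSplitOn_single, hhead, pvPiece_two s h2]
  | case2 s p kv hkv hsep ih =>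
    have hsep' : ¬ (pvPartitionC s ',').2.1 = [] := hsep
    have hsplit : pvSplitC ',' [] s =
        (pvPartitionC s ',').1 :: pvSplitC ',' [] (pvPartitionC s ',').2.2 := by
      rw [pvSplitC_partition]; simp [hsep']
    have hokt : pvOkC (pvPartitionC s ',').2.2 := fun q hq =>
      hok q (by rw [hsplit]; exact List.mem_cons_of_mem _ hq)
    have h2 : (pvSplitC ':' [] (pvPartitionC s ',').1).length = 2 :=
      hok _ (by rw [hsplit]; exact List.mem_cons_self)
    have ih' : pvGoB (pvPartitionC s ',').2.2 =
        ((pvSplitC ',' [] (pvPartitionC s ',').2.2).map pvPairC).unzip := ih hokt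
    rw [pvGoB, hsplit]
    simp [hsep', pvPairC, PySem.Chars.split?, pvSplitOn_single, pvPiece_two _ h2,
      ih', List.unzip_eq_map]
  | case3 s p kv hkv =>
    exfalso
    have h2 : (pvSplitC ':' [] (pvPartitionC s ',').1).length = 2 := by
      by_cases hsep : (pvPartitionC s ',').2.1 = []
      · have hhead := pvPartitionC_head_of_no_sep s ',' hsep
        have hmem : s ∈ pvSplitC ',' [] s := by rw [pvSplitC_partition]; simp [hsep]
        rw [hhead]; exact hok s hmem
      · have hmem : (pvPartitionC s ',').1 ∈ pvSplitC ',' [] s := by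
          rw [pvSplitC_partition]; simp [hsep]
        exact hok _ hmem
    exact hkv (by
      show (((PySem.Chars.split? (pvPartitionC s ',').1 [':']).getD []).map
        PySem.Chars.strip).length = 2
      simp [PySem.Chars.split?, pvSplitOn_single, h2])

-- A's fold over pieces each splitting into two parts is the unzip of the stripped pairs
theorem pvFoldA_eq_unzip (l : List String) (ks vs : List String)
    (h : ∀ p ∈ l, ((PySem.Str.split? p ":").getD []).length = 2) :
    l.foldl
      (fun (acc : List String × List String) pair =>
        match ((PySem.Str.split? pair ":").getD []).map PySem.Str.strip with
        | [key, val] => (acc.1 ++ [key], acc.2 ++ [val])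
        | _ => acc)
      (ks, vs)
    = (ks ++ (l.map (fun p => String.ofList (pvPairC p.toList).1)),
       vs ++ (l.map (fun p => String.ofList (pvPairC p.toList).2))) := by
  induction l generalizing ks vs with
  | nil => simp
  | cons p t ih =>
    have hp := h p (by simp)
    have hsplit : (PySem.Str.split? p ":").getD [] =
        [String.ofList (pvPartitionC p.toList ':').1,
         String.ofList (pvPartitionC p.toList ':').2.2] := by
      have h2 : (pvSplitC ':' [] p.toList).length = 2 := by
        simpa [PySem.Str.split?, PySem.Chars.split?, pvSplitOn_single] using hp
      simp [PySem.Str.split?, PySem.Chars.split?, pvSplitOn_single, pvPiece_two _ h2]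
    simp only [List.foldl_cons, hsplit, List.map_cons]
    rw [ih _ _ (fun q hq => h q (by simp [hq]))]
    simp only [PySem.Str.strip, pvPairC]
    simp

theorem pvWitness_ok :
    Dom_extract_csv_data pvWitness_extract_csv_data ∧
    Pre_extract_csv_data pvWitness_extract_csv_data := by decide

-- ===== VERDICT (by name: the statement is the Claim_ definition above) =====
theorem extract_csv_data_spec : Claim_equal_extract_csv_data := by
  intro csv_data _hDom hPre
  unfold Spec_extract_csv_data extract_csv_data extract_csv_data_alt
  simp only [List.map_id]
  rw [pvFoldA_eq_unzip _ [] [] hPre]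
  have hpieces : (PySem.Str.split? (PySem.Str.strip csv_data) ",").getD [] =
      (pvSplitC ',' [] (PySem.Chars.strip csv_data.toList)).map String.ofList := by
    simp [PySem.Str.split?, PySem.Chars.split?, pvSplitOn_single, PySem.Str.strip]
  have hok : pvOkC (PySem.Chars.strip csv_data.toList) := by
    intro p hp
    have hmem : String.ofList p ∈ (PySem.Str.split? (PySem.Str.strip csv_data) ",").getD [] := by
      rw [hpieces]; exact List.mem_map_of_mem hp
    have := hPre _ hmem
    simpa [PySem.Str.split?, PySem.Chars.split?, pvSplitOn_single] using this
  rw [hpieces, pvGoB_eq_unzip _ hok]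
  simp [List.unzip_eq_map, Function.comp_def]
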